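-- pv_equiv track=rewrite | github.com/qtcyy/LeetCode-Record-3.17 | 贪心/chapter4/4.3/No2931/main.py | maxSpending
-- ===== SOURCE A (Python) =====
-- from typing import List
--
-- def maxSpending(values: List[List[int]]) -> int:
--     a = []
--     for row in values:
--         for x in row:
--             a.append(x)
--     a.sort()
--     ans = 0
--     for i, x in enumerate(a, 1):
--         ans += i * x
--     return ans
-- ===== SOURCE B (Python) =====
-- def _merge(xs, ys):
--     i = 0
--     j = 0
--     out = []
--     while i < len(xs) and j < len(ys):
--         if xs[i] <= ys[j]:
--             out.append(xs[i])
--             i += 1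
--         else:
--             out.append(ys[j])
--             j += 1
--     out.extend(xs[i:])
--     out.extend(ys[j:])
--     return out
--
--
-- def maxSpending(values):
--     runs = [sorted(row) for row in values]
--     while len(runs) > 1:
--         nxt = []
--         for i in range(0, len(runs) - 1, 2):
--             nxt.append(_merge(runs[i], runs[i + 1]))
--         if len(runs) % 2 == 1:
--             nxt.append(runs[-1])
--         runs = nxt
--     merged = runs[0] if runs else []
--     ans = 0
--     rank = 1
--     for x in merged:
--         ans += rank * x
--         rank += 1
--     return ans
-- ===== Notes on version B (the rewrite author's own statement) =====
-- stated objective: alternative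
-- what changed: B never builds and globally sorts the flattened list: it sorts each row and combines the sorted rows by balanced rounds of a hand-written two-way merge, then accumulates rank*value with an explicit (ans, rank) accumulator instead of enumerate.
import Mathlib
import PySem

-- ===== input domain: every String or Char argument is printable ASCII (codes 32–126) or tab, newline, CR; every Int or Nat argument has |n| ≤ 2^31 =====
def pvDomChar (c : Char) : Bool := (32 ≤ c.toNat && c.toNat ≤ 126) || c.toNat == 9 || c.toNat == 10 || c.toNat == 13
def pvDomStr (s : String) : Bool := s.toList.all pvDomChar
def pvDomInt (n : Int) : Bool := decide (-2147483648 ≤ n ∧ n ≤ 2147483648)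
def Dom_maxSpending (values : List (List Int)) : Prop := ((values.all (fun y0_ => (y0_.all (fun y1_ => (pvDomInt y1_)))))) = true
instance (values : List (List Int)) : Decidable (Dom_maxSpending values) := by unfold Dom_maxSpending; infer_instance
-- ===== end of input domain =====

-- B replaces the flatten-then-global-sort of A by sorting each row and combining the sorted
-- rows with balanced rounds of a hand-written two-way merge (alternative algorithm, same results).

-- ===== PORT A =====
def maxSpending (values : List (List Int)) : Int :=
  let a := values.foldl (fun acc row => row.foldl (fun acc x => acc ++ [x]) acc) []
  let s := PySem.List.sorted a (fun x => x) false
  (PySem.List.enumerate s 1).foldl (fun ans p => ans + p.1 * p.2) 0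

-- ===== PORT B =====
-- transliteration of Source B's _merge (the index-based while loop, as the obvious structural recursion)
def pvMerge : List Int → List Int → List Int
  | [], ys => ys
  | x :: xs, [] => x :: xs
  | x :: xs, y :: ys =>
      if x ≤ y then x :: pvMerge xs (y :: ys) else y :: pvMerge (x :: xs) ys

-- one pass of Source B's inner 'for i in range(0, len(runs)-1, 2)' loop plus the odd leftover
def pvPairUp : List (List Int) → List (List Int)
  | a :: b :: rest => pvMerge a b :: pvPairUp rest
  | rest => rest

theorem pvPairUp_length_le : ∀ (l : List (List Int)), (pvPairUp l).length ≤ l.length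
  | [] => by simp [pvPairUp]
  | [a] => by simp [pvPairUp]
  | a :: b :: rest => by
    simp only [pvPairUp, List.length_cons]
    have := pvPairUp_length_le rest
    omega

-- Source B's 'while len(runs) > 1' loop
def pvMergeAll : List (List Int) → List Int
  | [] => []
  | [r] => r
  | a :: b :: rest => pvMergeAll (pvPairUp (a :: b :: rest))
  termination_by l => l.length
  decreasing_by
    simp only [pvPairUp, List.length_cons]
    have := pvPairUp_length_le rest
    omega

def maxSpending_alt (values : List (List Int)) : Int :=
  let merged := pvMergeAll (values.map (fun row => PySem.List.sorted row (fun x => x) false))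
  (merged.foldl (fun (p : Int × Int) x => (p.1 + p.2 * x, p.2 + 1)) (0, 1)).1

-- ===== PRECONDITION & SPEC =====
def Spec_maxSpending (values : List (List Int)) (out : Int) : Prop := out = maxSpending_alt values
instance (values : List (List Int)) (out : Int) : Decidable (Spec_maxSpending values out) := by unfold Spec_maxSpending; infer_instance

-- ===== CLAIM (what is proved, stated in full; the proofs are below) =====
def Claim_equal_maxSpending : Prop := ∀ (values : List (List Int)), Dom_maxSpending values → Spec_maxSpending values (maxSpending values)

-- ===== LEMMAS AND PROOFS =====

theorem pvMerge_perm : ∀ (xs ys : List Int), (pvMerge xs ys).Perm (xs ++ ys)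
  | [], ys => by simp [pvMerge]
  | x :: xs, [] => by simp [pvMerge]
  | x :: xs, y :: ys => by
    simp only [pvMerge]
    split
    · exact (pvMerge_perm xs (y :: ys)).cons x
    · exact ((pvMerge_perm (x :: xs) ys).cons y).trans
        (List.perm_middle (a := y) (l₁ := x :: xs) (l₂ := ys)).symm

theorem pvMerge_mem {z : Int} {xs ys : List Int} (h : z ∈ pvMerge xs ys) : z ∈ xs ∨ z ∈ ys := by
  have := (pvMerge_perm xs ys).mem_iff.mp h
  simpa using this

theorem pvMerge_pairwise : ∀ (xs ys : List Int), xs.Pairwise (· ≤ ·) → ys.Pairwise (· ≤ ·) →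
    (pvMerge xs ys).Pairwise (· ≤ ·)
  | [], ys, _, hy => by simpa [pvMerge] using hy
  | x :: xs, [], hx, _ => by simpa [pvMerge] using hx
  | x :: xs, y :: ys, hx, hy => by
    simp only [pvMerge]
    rcases List.pairwise_cons.mp hx with ⟨hxall, hxs⟩
    rcases List.pairwise_cons.mp hy with ⟨hyall, hys⟩
    split
    · rename_i hxy
      refine List.pairwise_cons.mpr ⟨?_, pvMerge_pairwise xs (y :: ys) hxs hy⟩
      intro z hz
      rcases pvMerge_mem hz with h | h
      · exact hxall z h
      · rcases List.mem_cons.mp h with rfl | h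
        · exact hxy
        · exact le_trans hxy (hyall z h)
    · rename_i hxy
      have hyx : y ≤ x := le_of_not_ge (by omega)
      refine List.pairwise_cons.mpr ⟨?_, pvMerge_pairwise (x :: xs) ys hx hys⟩
      intro z hz
      rcases pvMerge_mem hz with h | h
      · rcases List.mem_cons.mp h with rfl | h
        · exact hyx
        · exact le_trans hyx (hxall z h)
      · exact hyall z h

theorem pvPairUp_flatten_perm : ∀ (l : List (List Int)), (pvPairUp l).flatten.Perm l.flatten
  | [] => by simp [pvPairUp]
  | [a] => by simp [pvPairUp]
  | a :: b :: rest => by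
    simp only [pvPairUp, List.flatten_cons]
    exact ((pvMerge_perm a b).append_right _).trans
      (((pvPairUp_flatten_perm rest).append_left (a ++ b)).trans (List.Perm.of_eq (by simp)))

theorem pvPairUp_sorted : ∀ (l : List (List Int)),
    (∀ r ∈ l, r.Pairwise (· ≤ ·)) → ∀ r ∈ pvPairUp l, r.Pairwise (· ≤ ·)
  | [] => by simp [pvPairUp]
  | [a] => by simp [pvPairUp]
  | a :: b :: rest => by
    intro h r hr
    simp only [pvPairUp, List.mem_cons] at hr
    rcases hr with rfl | hr
    · exact pvMerge_pairwise a b (h a (by simp)) (h b (by simp))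
    · exact pvPairUp_sorted rest (fun r hr => h r (by simp [hr])) r hr

theorem pvMergeAll_inv : ∀ (l : List (List Int)), (∀ r ∈ l, r.Pairwise (· ≤ ·)) →
    (pvMergeAll l).Pairwise (· ≤ ·) ∧ (pvMergeAll l).Perm l.flatten
  | [] => by intro _; simp [pvMergeAll]
  | [r] => by intro h; simpa [pvMergeAll] using h r (by simp)
  | a :: b :: rest => by
    intro h
    rw [pvMergeAll]
    obtain ⟨h1, h2⟩ := pvMergeAll_inv (pvPairUp (a :: b :: rest)) (pvPairUp_sorted _ h)
    exact ⟨h1, h2.trans (pvPairUp_flatten_perm _)⟩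
  termination_by l => l.length
  decreasing_by
    simp only [pvPairUp, List.length_cons]
    have := pvPairUp_length_le rest
    omega

theorem flatten_map_sorted_perm : ∀ (values : List (List Int)),
    (values.map (fun row => PySem.List.sorted row (fun x => x) false)).flatten.Perm values.flatten
  | [] => by simp
  | row :: rest => by
    simp only [List.map_cons, List.flatten_cons]
    exact (PySem.List.sorted_perm row _ _).append (flatten_map_sorted_perm rest)

/-- The two summation loops agree on any list, for any start of the accumulators. -/
theorem sum_loops_eq (l : List Int) : ∀ (ans r : Int),
    (PySem.List.enumerate l r).foldl (fun ans p => ans + p.1 * p.2) ans =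
    (l.foldl (fun (p : Int × Int) x => (p.1 + p.2 * x, p.2 + 1)) (ans, r)).1 := by
  induction l with
  | nil => intro ans r; simp [PySem.List.enumerate_nil]
  | cons x xs ih => intro ans r; simp [PySem.List.enumerate_cons, ih]

-- ===== VERDICT (by name: the statement is the Claim_ definition above) =====
theorem maxSpending_spec : Claim_equal_maxSpending := by
  intro values _
  unfold Spec_maxSpending maxSpending maxSpending_alt
  have hstep : (fun (acc : List Int) (row : List Int) => row.foldl (fun acc x => acc ++ [x]) acc)
      = fun acc row => acc ++ row := by
    funext acc row
    exact PySem.List.foldl_append_singleton_eq_self row acc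
  have hflat : values.foldl (fun acc row => row.foldl (fun acc x => acc ++ [x]) acc) ([] : List Int)
      = values.flatten := by
    rw [hstep]
    simpa using PySem.List.foldl_append_eq_flatten values ([] : List Int)
  obtain ⟨hpw, hperm⟩ := pvMergeAll_inv (values.map (fun row => PySem.List.sorted row (fun x => x) false))
    (by
      intro r hr
      rcases List.mem_map.mp hr with ⟨row, _, rfl⟩
      exact PySem.List.sorted_pairwise row (fun x => x))
  have hperm' : (pvMergeAll (values.map (fun row => PySem.List.sorted row (fun x => x) false))).Perm
      values.flatten := hperm.trans (flatten_map_sorted_perm values)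
  have hsorted : PySem.List.sorted (values.flatten) (fun x => x) false
      = pvMergeAll (values.map (fun row => PySem.List.sorted row (fun x => x) false)) :=
    PySem.List.sorted_id_eq_of_perm_of_pairwise _ _ hperm' hpw
  simp only [hflat, hsorted]
  exact sum_loops_eq _ 0 1
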